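-- pv_equiv track=rewrite | github.com/tetsuose/devtopology | engine/index.py | build_directory_index
-- ===== SOURCE A (Python) =====
-- def build_directory_index(files: list[str]) -> tuple[list[str], list[dict[str, str]]]:
--     dirs = {"."}
--     edges: set[tuple[str, str]] = set()
--     for rel in files:
--         parts = rel.split("/")
--         if len(parts) == 1:
--             edges.add(("dir:.", f"file:{rel}"))
--             continue
--         parent = "."
--         prefix_parts: list[str] = []
--         for piece in parts[:-1]:
--             prefix_parts.append(piece)
--             cur = "/".join(prefix_parts)
--             dirs.add(cur)
--             edges.add((f"dir:{parent}", f"dir:{cur}"))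
--             parent = cur
--         edges.add((f"dir:{parent}", f"file:{rel}"))
--     return sorted(dirs), [{"from": f, "to": t, "type": "contains"} for f, t in sorted(edges)]
-- ===== SOURCE B (Python) =====
-- def build_directory_index(files: list[str]) -> tuple[list[str], list[dict[str, str]]]:
--     # pass 1: collect every proper path prefix as a directory
--     subdirs: set[str] = set()
--     for rel in files:
--         parts = rel.split("/")
--         for i in range(1, len(parts)):
--             subdirs.add("/".join(parts[:i]))
--     # pass 2: one containment edge per directory, parent derived from the name
--     edges: set[tuple[str, str]] = set()
--     for d in sorted(subdirs):
--         parent = "/".join(d.split("/")[:-1]) if "/" in d else "."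
--         edges.add((f"dir:{parent}", f"dir:{d}"))
--     # pass 3: one edge per file, from its containing directory
--     for rel in files:
--         parts = rel.split("/")
--         parent = "." if len(parts) == 1 else "/".join(parts[:-1])
--         edges.add((f"dir:{parent}", f"file:{rel}"))
--     return sorted(subdirs | {"."}), [{"from": f, "to": t, "type": "contains"} for f, t in sorted(edges)]
-- ===== Notes on version B (the rewrite author's own statement) =====
-- stated objective: alternative
-- what changed: Instead of one interleaved walk that threads a parent variable and grows dirs and edges together, B first collects all proper path prefixes as the directory set, then derives each dir-to-dir edge from the directory name alone (parent = name up to the last slash), and finally adds file edges in a third pass.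
import Mathlib
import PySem

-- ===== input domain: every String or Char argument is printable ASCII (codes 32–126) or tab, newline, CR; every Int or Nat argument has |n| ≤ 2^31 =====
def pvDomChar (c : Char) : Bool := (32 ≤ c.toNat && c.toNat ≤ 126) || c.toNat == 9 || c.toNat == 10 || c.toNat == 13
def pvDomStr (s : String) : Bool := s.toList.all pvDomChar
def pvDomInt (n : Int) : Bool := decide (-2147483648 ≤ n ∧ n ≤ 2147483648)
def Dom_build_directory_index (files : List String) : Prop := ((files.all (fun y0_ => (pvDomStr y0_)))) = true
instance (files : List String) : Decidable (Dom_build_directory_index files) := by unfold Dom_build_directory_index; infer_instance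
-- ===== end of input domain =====

-- ===== PORT A =====
def build_directory_index (files : List String) : List String × (List (List (String × String))) :=
  let st := files.foldl (fun (st : PySem.Set String × PySem.Set (String × String)) rel =>
    let dirs := st.1
    let edges := st.2
    let parts := ((PySem.Str.split? rel "/").getD [])
    if parts.length = 1 then
      (dirs, PySem.Set.add edges ("dir:.", "file:" ++ rel))
    else
      let inner := (PySem.List.slice parts none (some (-1))).foldl
        (fun (st : String × List String × PySem.Set String × PySem.Set (String × String)) piece =>
          let parent := st.1
          let pp := st.2.1 ++ [piece]
          let cur := PySem.Str.join "/" pp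
          (cur, pp, PySem.Set.add st.2.2.1 cur,
            PySem.Set.add st.2.2.2 ("dir:" ++ parent, "dir:" ++ cur)))
        (".", ([], dirs, edges))
      (inner.2.2.1, PySem.Set.add inner.2.2.2 ("dir:" ++ inner.1, "file:" ++ rel)))
    (PySem.Set.ofList ["."], PySem.Set.empty)
  (PySem.List.sorted st.1 (fun x => x) false,
   (PySem.List.sorted2 st.2 (fun e => e.1) (fun e => e.2) false).map
     (fun e => [("from", e.1), ("to", e.2), ("type", "contains")]))

-- ===== PORT B =====
-- B: collect all proper path prefixes first, then derive each dir edge from the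
-- directory name alone, then add file edges in a third pass.
def build_directory_index_alt (files : List String) : List String × (List (List (String × String))) :=
  let subdirs := files.foldl (fun (subdirs : PySem.Set String) rel =>
      let parts := ((PySem.Str.split? rel "/").getD [])
      (PySem.List.pyRange 1 (parts.length : Int)).foldl
        (fun subdirs i => PySem.Set.add subdirs (PySem.Str.join "/" (PySem.List.slice parts none (some i))))
        subdirs)
    PySem.Set.empty
  let edges := (PySem.List.sorted subdirs (fun x => x) false).foldl
    (fun (edges : PySem.Set (String × String)) d =>
      let parent := if PySem.Str.isIn "/" d then
          PySem.Str.join "/" (PySem.List.slice ((PySem.Str.split? d "/").getD []) none (some (-1)))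
        else "."
      PySem.Set.add edges ("dir:" ++ parent, "dir:" ++ d))
    PySem.Set.empty
  let edges := files.foldl (fun (edges : PySem.Set (String × String)) rel =>
      let parts := ((PySem.Str.split? rel "/").getD [])
      let parent := if parts.length = 1 then "." else PySem.Str.join "/" (PySem.List.slice parts none (some (-1)))
      PySem.Set.add edges ("dir:" ++ parent, "file:" ++ rel))
    edges
  (PySem.List.sorted (PySem.Set.union subdirs ["."]) (fun x => x) false,
   (PySem.List.sorted2 edges (fun e => e.1) (fun e => e.2) false).map
     (fun e => [("from", e.1), ("to", e.2), ("type", "contains")]))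

-- ===== PRECONDITION & SPEC =====
def Spec_build_directory_index (files : List String) (out : List String × (List (List (String × String)))) : Prop := out = build_directory_index_alt files
instance (files : List String) (out : List String × (List (List (String × String)))) : Decidable (Spec_build_directory_index files out) := by unfold Spec_build_directory_index; infer_instance

-- ===== CLAIM (what is proved, stated in full; the proofs are below) =====
def Claim_equal_build_directory_index : Prop := ∀ (files : List String), Dom_build_directory_index files → Spec_build_directory_index files (build_directory_index files)

-- ===== LEMMAS AND PROOFS =====

def pvSplitChar (c : Char) : List Char → List (List Char)
  | [] => [[]]
  | x :: xs => if x = c then [] :: pvSplitChar c xs else (pvSplitChar c xs).modifyHead (fun p => x :: p)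

lemma pvSplitChar_ne_nil (c : Char) (s : List Char) : pvSplitChar c s ≠ [] := by
  induction s with
  | nil => simp [pvSplitChar]
  | cons x xs ih =>
    simp only [pvSplitChar]
    split_ifs
    · simp
    · simpa using ih

lemma pv_go_singleton (c : Char) : ∀ (fuel : Nat) (l cur : List Char) (acc : List (List Char)),
    l.length ≤ fuel →
    PySem.Chars.splitOn.go [c] fuel l cur acc
      = acc.reverse ++ (pvSplitChar c l).modifyHead (fun p => cur.reverse ++ p) := by
  intro fuel
  induction fuel with
  | zero =>
    intro l cur acc h
    have hl : l = [] := by cases l <;> simp_all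
    subst hl
    simp [PySem.Chars.splitOn.go, pvSplitChar]
  | succ f ih =>
    intro l cur acc h
    cases l with
    | nil => simp [PySem.Chars.splitOn.go, pvSplitChar]
    | cons x rest =>
      rw [PySem.Chars.splitOn.go]
      by_cases hx : x = c
      · subst hx
        have hpre : [x].isPrefixOf (x :: rest) = true := by simp [List.isPrefixOf]
        rw [if_pos hpre]
        have := ih rest [] (cur.reverse :: acc) (by simpa using Nat.le_of_succ_le_succ h)
        have hdrop : List.drop [x].length (x :: rest) = rest := by simp
        rw [hdrop, this]
        simp [pvSplitChar]
        cases pvSplitChar x rest <;> simp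
      · have hpre : [c].isPrefixOf (x :: rest) = false := by
          simp [List.isPrefixOf, Ne.symm hx]
        rw [if_neg (by simp [hpre])]
        rw [ih rest (x :: cur) acc (by simpa using Nat.le_of_succ_le_succ h)]
        simp only [pvSplitChar, if_neg hx]
        congr 1
        cases hS : pvSplitChar c rest with
        | nil => exact absurd hS (pvSplitChar_ne_nil c rest)
        | cons hd tl => simp

lemma pv_splitOn_singleton (c : Char) (s : List Char) :
    PySem.Chars.splitOn s [c] = pvSplitChar c s := by
  unfold PySem.Chars.splitOn
  rw [pv_go_singleton c (s.length + 1) s [] [] (by omega)]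
  cases h : pvSplitChar c s <;> simp

lemma pvSplitChar_not_mem (c : Char) (s : List Char) : ∀ p ∈ pvSplitChar c s, c ∉ p := by
  induction s with
  | nil => simp [pvSplitChar]
  | cons x xs ih =>
    simp only [pvSplitChar]
    split_ifs with hx
    · intro p hp
      rcases List.mem_cons.mp hp with rfl | hp
      · simp
      · exact ih _ hp
    · intro p hp
      cases hS : pvSplitChar c xs with
      | nil => exact absurd hS (pvSplitChar_ne_nil c xs)
      | cons hd tl =>
        rw [hS] at hp
        simp only [List.modifyHead_cons] at hp
        rcases List.mem_cons.mp hp with hp | hp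
        · subst hp
          intro hmem
          rcases List.mem_cons.mp hmem with rfl | hmem
          · exact hx rfl
          · exact ih hd (by rw [hS]; exact List.mem_cons_self ..) hmem
        · exact ih p (by rw [hS]; exact List.mem_cons_of_mem _ hp)

lemma pvSplitChar_of_not_mem {c : Char} {s : List Char} (h : c ∉ s) : pvSplitChar c s = [s] := by
  induction s with
  | nil => simp [pvSplitChar]
  | cons x xs ih =>
    have hx : ¬ x = c := fun he => h (he ▸ List.mem_cons_self ..)
    have hxs : c ∉ xs := fun hm => h (List.mem_cons_of_mem _ hm)
    simp [pvSplitChar, hx, ih hxs]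

lemma pvSplitChar_append_cons {c : Char} {a : List Char} (s : List Char) (h : c ∉ a) :
    pvSplitChar c (a ++ c :: s) = a :: pvSplitChar c s := by
  induction a with
  | nil => simp [pvSplitChar]
  | cons y a' ih =>
    have hy : ¬ y = c := fun he => h (he ▸ List.mem_cons_self ..)
    have ha' : c ∉ a' := fun hm => h (List.mem_cons_of_mem _ hm)
    simp [pvSplitChar, hy, ih ha']

lemma pv_intercalate_cons_cons {c : Char} (a b : List Char) (t : List (List Char)) :
    List.intercalate [c] (a :: b :: t) = a ++ c :: List.intercalate [c] (b :: t) := by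
  simp [List.intercalate]

lemma pvSplitChar_intercalate {c : Char} : ∀ {ls : List (List Char)}, ls ≠ [] →
    (∀ l ∈ ls, c ∉ l) → pvSplitChar c (List.intercalate [c] ls) = ls := by
  intro ls
  induction ls with
  | nil => intro h; exact absurd rfl h
  | cons a t ih =>
    intro _ h
    cases t with
    | nil => simpa [List.intercalate] using pvSplitChar_of_not_mem (h a (by simp))
    | cons b t' =>
      rw [pv_intercalate_cons_cons, pvSplitChar_append_cons _ (h a (by simp))]
      rw [ih (by simp) (fun l hl => h l (List.mem_cons_of_mem _ hl))]

lemma pv_mem_intercalate {c : Char} {ls : List (List Char)} (h : ∀ l ∈ ls, c ∉ l) :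
    c ∈ List.intercalate [c] ls ↔ 2 ≤ ls.length := by
  cases ls with
  | nil => simp [List.intercalate]
  | cons a t =>
    cases t with
    | nil => simp [List.intercalate, h a (by simp)]
    | cons b t' => simp [pv_intercalate_cons_cons]

def pvParts (rel : String) : List String := (PySem.Str.split? rel "/").getD []
def pvJ (ps : List String) : String := PySem.Str.join "/" ps

lemma pv_slash_toList : ("/" : String).toList = ['/'] := by decide

lemma pvParts_eq (rel : String) : pvParts rel = (pvSplitChar '/' rel.toList).map String.ofList := by
  unfold pvParts
  rw [PySem.Str.split?]
  rw [pv_slash_toList]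
  rw [PySem.Chars.split?]
  simp [pv_splitOn_singleton]

lemma pvParts_ne_nil (rel : String) : pvParts rel ≠ [] := by
  rw [pvParts_eq]
  simpa using pvSplitChar_ne_nil '/' rel.toList

lemma pvParts_noslash (rel : String) : ∀ p ∈ pvParts rel, ('/' : Char) ∉ p.toList := by
  rw [pvParts_eq]
  intro p hp
  rcases List.mem_map.mp hp with ⟨q, hq, rfl⟩
  rw [String.toList_ofList]
  exact pvSplitChar_not_mem _ _ q hq

lemma pvJ_toList (ps : List String) :
    (pvJ ps).toList = List.intercalate ['/'] (ps.map String.toList) := by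
  rw [pvJ, PySem.Str.toList_join, pv_slash_toList]
  rfl


lemma pvParts_pvJ {ps : List String} (h0 : ps ≠ []) (h : ∀ p ∈ ps, ('/' : Char) ∉ p.toList) :
    pvParts (pvJ ps) = ps := by
  rw [pvParts_eq, pvJ_toList, pvSplitChar_intercalate (by simpa using h0)
    (by intro l hl; rcases List.mem_map.mp hl with ⟨p, hp, rfl⟩; exact h p hp)]
  rw [List.map_map]
  exact List.map_id'' (fun x => String.ofList_toList) ps

lemma pv_singleton_infix {a : Char} {l : List Char} : [a] <:+: l ↔ a ∈ l := by
  constructor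
  · intro h; exact h.subset (by simp)
  · intro h
    rcases List.append_of_mem h with ⟨s, t, rfl⟩
    exact ⟨s, t, by simp⟩

lemma pv_isIn_pvJ {ps : List String} (h : ∀ p ∈ ps, ('/' : Char) ∉ p.toList) :
    (PySem.Str.isIn "/" (pvJ ps) = true ↔ 2 ≤ ps.length) := by
  rw [PySem.Str.isIn_iff_infix, pv_slash_toList, pvJ_toList, pv_singleton_infix,
    pv_mem_intercalate (by intro l hl; rcases List.mem_map.mp hl with ⟨p, hp, rfl⟩; exact h p hp)]
  simp

lemma pv_slice_neg_one {α : Type} (xs : List α) :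
    PySem.List.slice xs none (some (-1)) = xs.dropLast := by
  unfold PySem.List.slice PySem.List.clampIdx
  cases xs with
  | nil => simp
  | cons x t =>
    simp only []
    norm_num
    rw [List.dropLast_eq_take]
    have : (if (↑t.length : Int) < 0 then 0 else t.length) = (x :: t).length - 1 := by
      simp
    rw [this]

def pvParentB (d : String) : String :=
  if PySem.Str.isIn "/" d then pvJ (PySem.List.slice ((PySem.Str.split? d "/").getD []) none (some (-1))) else "."

lemma pvParentB_pvJ {ps : List String} (h0 : ps ≠ []) (h : ∀ p ∈ ps, ('/' : Char) ∉ p.toList) :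
    pvParentB (pvJ ps) = if ps.length = 1 then "." else pvJ ps.dropLast := by
  by_cases h1 : ps.length = 1
  · have : PySem.Str.isIn "/" (pvJ ps) = false := by
      rw [Bool.eq_false_iff]
      intro hc
      have := (pv_isIn_pvJ h).mp hc
      omega
    rw [pvParentB, this, if_pos h1]
    simp
  · have h2 : 2 ≤ ps.length := by
      have : ps.length ≠ 0 := by simpa using h0
      omega
    rw [pvParentB, (pv_isIn_pvJ h).mpr h2]
    simp only [if_neg h1]
    have : ((PySem.Str.split? (pvJ ps) "/").getD []) = ps := pvParts_pvJ h0 h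
    rw [this, pv_slice_neg_one]
    simp

def pvDirSpec (files : List String) (x : String) : Prop :=
  ∃ rel ∈ files, ∃ k : Nat, 1 ≤ k ∧ k < (pvParts rel).length ∧ x = pvJ ((pvParts rel).take k)

def pvParent (rel : String) (k : Nat) : String :=
  if k = 1 then "." else pvJ ((pvParts rel).take (k - 1))

def pvFileParent (rel : String) : String :=
  if (pvParts rel).length = 1 then "." else pvJ ((pvParts rel).dropLast)

def pvEdgeSpec (files : List String) (y : String × String) : Prop :=
  (∃ rel ∈ files, ∃ k : Nat, 1 ≤ k ∧ k < (pvParts rel).length ∧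
      y = ("dir:" ++ pvParent rel k, "dir:" ++ pvJ ((pvParts rel).take k)))
  ∨ (∃ rel ∈ files, y = ("dir:" ++ pvFileParent rel, "file:" ++ rel))

def pvStepInner (st : String × List String × PySem.Set String × PySem.Set (String × String))
    (piece : String) : String × List String × PySem.Set String × PySem.Set (String × String) :=
  let parent := st.1
  let pp := st.2.1 ++ [piece]
  let cur := PySem.Str.join "/" pp
  (cur, pp, PySem.Set.add st.2.2.1 cur,
    PySem.Set.add st.2.2.2 ("dir:" ++ parent, "dir:" ++ cur))

lemma pv_innerA_spec (qs : List String) :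
    ∀ (p0 : String) (pp : List String) (d : PySem.Set String) (e : PySem.Set (String × String)),
    (qs.foldl pvStepInner (p0, pp, d, e)).2.1 = pp ++ qs ∧
    (qs.foldl pvStepInner (p0, pp, d, e)).1 = (if qs = [] then p0 else pvJ (pp ++ qs)) ∧
    (∀ x, x ∈ (qs.foldl pvStepInner (p0, pp, d, e)).2.2.1 ↔
        x ∈ d ∨ ∃ k : Nat, 1 ≤ k ∧ k ≤ qs.length ∧ x = pvJ (pp ++ qs.take k)) ∧
    (∀ y, y ∈ (qs.foldl pvStepInner (p0, pp, d, e)).2.2.2 ↔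
        y ∈ e ∨ ∃ k : Nat, 1 ≤ k ∧ k ≤ qs.length ∧
          y = ("dir:" ++ (if k = 1 then p0 else pvJ (pp ++ qs.take (k - 1))),
               "dir:" ++ pvJ (pp ++ qs.take k))) := by
  induction qs with
  | nil =>
    intro p0 pp d e
    refine ⟨by simp, by simp, fun x => ?_, fun y => ?_⟩ <;> simp <;> omega
  | cons q rest ih =>
    intro p0 pp d e
    have hstep : pvStepInner (p0, pp, d, e) q =
        (pvJ (pp ++ [q]), pp ++ [q], PySem.Set.add d (pvJ (pp ++ [q])),
         PySem.Set.add e ("dir:" ++ p0, "dir:" ++ pvJ (pp ++ [q]))) := rfl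
    simp only [List.foldl_cons, hstep]
    obtain ⟨ih1, ih2, ih3, ih4⟩ := ih (pvJ (pp ++ [q])) (pp ++ [q])
      (PySem.Set.add d (pvJ (pp ++ [q])))
      (PySem.Set.add e ("dir:" ++ p0, "dir:" ++ pvJ (pp ++ [q])))
    refine ⟨?_, ?_, ?_, ?_⟩
    · rw [ih1, ← List.append_cons]
    · rw [ih2]
      cases rest with
      | nil => simp
      | cons r t => simp [← List.append_cons]
    · intro x
      rw [ih3 x, PySem.Set.mem_add]
      constructor
      · rintro ((hx | rfl) | ⟨k, hk1, hk2, rfl⟩)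
        · exact Or.inl hx
        · exact Or.inr ⟨1, by omega, by simp, by simp⟩
        · exact Or.inr ⟨k + 1, by omega, by simp; omega,
            by simp [List.take_succ_cons, ← List.append_cons]⟩
      · rintro (hx | ⟨k, hk1, hk2, rfl⟩)
        · exact Or.inl (Or.inl hx)
        · rcases Nat.eq_or_lt_of_le hk1 with h1 | h1
          · refine Or.inl (Or.inr ?_)
            simp [← h1]
          · refine Or.inr ⟨k - 1, by omega, by simp at hk2 ⊢; omega, ?_⟩
            have hk : k = (k - 1) + 1 := by omega
            rw [hk]
            simp [List.take_succ_cons, ← List.append_cons]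
    · intro y
      rw [ih4 y, PySem.Set.mem_add]
      constructor
      · rintro ((hy | rfl) | ⟨k, hk1, hk2, rfl⟩)
        · exact Or.inl hy
        · exact Or.inr ⟨1, by omega, by simp, by simp⟩
        · refine Or.inr ⟨k + 1, by omega, by simp; omega, ?_⟩
          rcases Nat.eq_or_lt_of_le hk1 with h1 | h1
          · simp [← h1, List.take_succ_cons, ← List.append_cons]
          · have hne : ¬ (k + 1 = 1) := by omega
            have hne' : ¬ (k = 1) := by omega
            have hk : k + 1 - 1 = (k - 1) + 1 := by omega
            simp only [if_neg hne, if_neg hne', hk, List.take_succ_cons,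
              List.take_succ_cons, ← List.append_cons]
      · rintro (hy | ⟨k, hk1, hk2, rfl⟩)
        · exact Or.inl (Or.inl hy)
        · rcases Nat.eq_or_lt_of_le hk1 with h1 | h1
          · refine Or.inl (Or.inr ?_)
            simp [← h1]
          · obtain ⟨n, rfl⟩ : ∃ n, k = n + 1 := ⟨k - 1, by omega⟩
            refine Or.inr ⟨n, by omega, by simp at hk2 ⊢; omega, ?_⟩
            rcases Nat.eq_or_lt_of_le (by omega : 1 ≤ n) with h2 | h2
            · rw [← h2]
              simp [List.take_succ_cons, ← List.append_cons]
            · obtain ⟨m, rfl⟩ : ∃ m, n = m + 1 := ⟨n - 1, by omega⟩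
              simp only [Nat.add_sub_cancel, if_neg (by omega : ¬ (m + 1 + 1 = 1)),
                if_neg (by omega : ¬ (m + 1 = 1)), List.take_succ_cons, ← List.append_cons]

lemma pv_innerA_nodup (qs : List String) :
    ∀ (p0 : String) (pp : List String) (d : PySem.Set String) (e : PySem.Set (String × String)),
    d.Nodup → e.Nodup →
    (qs.foldl pvStepInner (p0, pp, d, e)).2.2.1.Nodup ∧ (qs.foldl pvStepInner (p0, pp, d, e)).2.2.2.Nodup := by
  induction qs with
  | nil => intro p0 pp d e hd he; exact ⟨hd, he⟩
  | cons q rest ih =>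
    intro p0 pp d e hd he
    exact ih _ _ _ _ (PySem.Set.nodup_add _ _ hd) (PySem.Set.nodup_add _ _ he)

lemma pv_take_dropLast {α : Type} (l : List α) (k : Nat) (h : k + 1 ≤ l.length) :
    l.dropLast.take k = l.take k := by
  rw [List.dropLast_eq_take, List.take_take]
  congr 1
  omega

def pvStepOuter (st : PySem.Set String × PySem.Set (String × String)) (rel : String) :
    PySem.Set String × PySem.Set (String × String) :=
  if (pvParts rel).length = 1 then
    (st.1, PySem.Set.add st.2 ("dir:.", "file:" ++ rel))
  else
    let inner := (PySem.List.slice (pvParts rel) none (some (-1))).foldl pvStepInner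
      (".", ([], st.1, st.2))
    (inner.2.2.1, PySem.Set.add inner.2.2.2 ("dir:" ++ inner.1, "file:" ++ rel))

lemma pv_dirSpec_cons (rel : String) (rest : List String) (x : String) :
    pvDirSpec (rel :: rest) x ↔
      (∃ k : Nat, 1 ≤ k ∧ k < (pvParts rel).length ∧ x = pvJ ((pvParts rel).take k)) ∨ pvDirSpec rest x := by
  simp [pvDirSpec, List.exists_mem_cons_iff]

lemma pv_edgeSpec_cons (rel : String) (rest : List String) (y : String × String) :
    pvEdgeSpec (rel :: rest) y ↔
      ((∃ k : Nat, 1 ≤ k ∧ k < (pvParts rel).length ∧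
          y = ("dir:" ++ pvParent rel k, "dir:" ++ pvJ ((pvParts rel).take k)))
        ∨ y = ("dir:" ++ pvFileParent rel, "file:" ++ rel)) ∨ pvEdgeSpec rest y := by
  simp only [pvEdgeSpec, List.exists_mem_cons_iff]
  constructor
  · rintro ((h | h) | (h | h))
    · exact Or.inl (Or.inl h)
    · exact Or.inr (Or.inl h)
    · exact Or.inl (Or.inr h)
    · exact Or.inr (Or.inr h)
  · rintro ((h | h) | (h | h))
    · exact Or.inl (Or.inl h)
    · exact Or.inr (Or.inl h)
    · exact Or.inl (Or.inr h)
    · exact Or.inr (Or.inr h)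

lemma pv_outerA_spec (files : List String) :
    ∀ (d : PySem.Set String) (e : PySem.Set (String × String)),
    (∀ x, x ∈ (files.foldl pvStepOuter (d, e)).1 ↔ x ∈ d ∨ pvDirSpec files x) ∧
    (∀ y, y ∈ (files.foldl pvStepOuter (d, e)).2 ↔ y ∈ e ∨ pvEdgeSpec files y) := by
  induction files with
  | nil =>
    intro d e
    constructor <;> intro z <;> simp [pvDirSpec, pvEdgeSpec]
  | cons rel rest ih =>
    intro d e
    rw [List.foldl_cons]
    by_cases hL : (pvParts rel).length = 1
    · have hstep : pvStepOuter (d, e) rel = (d, PySem.Set.add e ("dir:.", "file:" ++ rel)) := by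
        rw [pvStepOuter, if_pos hL]
      rw [hstep]
      obtain ⟨ihd, ihe⟩ := ih d (PySem.Set.add e ("dir:.", "file:" ++ rel))
      constructor
      · intro x
        rw [ihd x, pv_dirSpec_cons]
        constructor
        · rintro (hx | hx)
          · exact Or.inl hx
          · exact Or.inr (Or.inr hx)
        · rintro (hx | ⟨k, hk1, hk2, _⟩ | hx)
          · exact Or.inl hx
          · omega
          · exact Or.inr hx
      · intro y
        rw [ihe y, PySem.Set.mem_add, pv_edgeSpec_cons]
        have hfp : pvFileParent rel = "." := by rw [pvFileParent, if_pos hL]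
        have hdd : ("dir:" ++ pvFileParent rel) = "dir:." := by rw [hfp]; rfl
        constructor
        · rintro ((hy | rfl) | hy)
          · exact Or.inl hy
          · exact Or.inr (Or.inl (Or.inr (by rw [hdd])))
          · exact Or.inr (Or.inr hy)
        · rintro (hy | (⟨k, hk1, hk2, _⟩ | rfl) | hy)
          · exact Or.inl (Or.inl hy)
          · omega
          · exact Or.inl (Or.inr (by rw [hdd]))
          · exact Or.inr hy
    · have hL1 : 1 ≤ (pvParts rel).length := by
        have := pvParts_ne_nil rel
        cases h : (pvParts rel) with
        | nil => exact absurd h this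
        | cons a t => simp [h]
      have hL2 : 2 ≤ (pvParts rel).length := by omega
      have hq : PySem.List.slice (pvParts rel) none (some (-1)) = (pvParts rel).dropLast :=
        pv_slice_neg_one _
      have hqlen : (pvParts rel).dropLast.length = (pvParts rel).length - 1 := by
        simp
      have hqne : (pvParts rel).dropLast ≠ [] := by
        intro hnil
        rw [← List.length_eq_zero_iff] at hnil
        omega
      obtain ⟨i1, i2, i3, i4⟩ := pv_innerA_spec ((pvParts rel).dropLast) "." [] d e
      have hstep : pvStepOuter (d, e) rel =
          ((((pvParts rel).dropLast).foldl pvStepInner (".", ([], d, e))).2.2.1,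
           PySem.Set.add ((((pvParts rel).dropLast).foldl pvStepInner (".", ([], d, e))).2.2.2)
             ("dir:" ++ ((((pvParts rel).dropLast).foldl pvStepInner (".", ([], d, e))).1), "file:" ++ rel)) := by
        rw [pvStepOuter, if_neg hL, hq]
      rw [hstep]
      have hpar : ((((pvParts rel).dropLast).foldl pvStepInner (".", ([], d, e))).1)
          = pvJ ((pvParts rel).dropLast) := by
        rw [i2, if_neg hqne]
        simp
      obtain ⟨ihd, ihe⟩ := ih _ _
      constructor
      · intro x
        rw [ihd x, i3 x, pv_dirSpec_cons]
        constructor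
        · rintro ((hx | ⟨k, hk1, hk2, rfl⟩) | hx)
          · exact Or.inl hx
          · refine Or.inr (Or.inl ⟨k, hk1, by omega, ?_⟩)
            rw [List.nil_append, pv_take_dropLast _ _ (by omega)]
          · exact Or.inr (Or.inr hx)
        · rintro (hx | ⟨k, hk1, hk2, rfl⟩ | hx)
          · exact Or.inl (Or.inl hx)
          · refine Or.inl (Or.inr ⟨k, hk1, by omega, ?_⟩)
            rw [List.nil_append, pv_take_dropLast _ _ (by omega)]
          · exact Or.inr hx
      · intro y
        rw [ihe y, PySem.Set.mem_add, i4 y, pv_edgeSpec_cons, hpar]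
        have hfp : pvFileParent rel = pvJ ((pvParts rel).dropLast) := by
          rw [pvFileParent, if_neg hL]
        have hpark : ∀ k : Nat, 1 ≤ k → k ≤ (pvParts rel).length - 1 →
            (if k = 1 then "." else pvJ ([] ++ ((pvParts rel).dropLast).take (k - 1))) = pvParent rel k := by
          intro k h1 h2
          rw [pvParent]
          by_cases hk1 : k = 1
          · rw [if_pos hk1, if_pos hk1]
          · rw [if_neg hk1, if_neg hk1, List.nil_append, pv_take_dropLast _ _ (by omega)]
        constructor
        · rintro ((((hy | ⟨k, hk1, hk2, rfl⟩)) | rfl) | hy)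
          · exact Or.inl hy
          · refine Or.inr (Or.inl (Or.inl ⟨k, hk1, by omega, ?_⟩))
            rw [hpark k hk1 (by omega), List.nil_append, pv_take_dropLast _ _ (by omega)]
          · exact Or.inr (Or.inl (Or.inr (by rw [hfp])))
          · exact Or.inr (Or.inr hy)
        · rintro (hy | ((⟨k, hk1, hk2, rfl⟩ | rfl) | hy))
          · exact Or.inl (Or.inl (Or.inl hy))
          · refine Or.inl (Or.inl (Or.inr ⟨k, hk1, by omega, ?_⟩))
            rw [hpark k hk1 (by omega), List.nil_append, pv_take_dropLast _ _ (by omega)]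
          · exact Or.inl (Or.inr (by rw [hfp]))
          · exact Or.inr hy

lemma pv_outerA_nodup (files : List String) :
    ∀ (d : PySem.Set String) (e : PySem.Set (String × String)),
    d.Nodup → e.Nodup → (files.foldl pvStepOuter (d, e)).1.Nodup ∧ (files.foldl pvStepOuter (d, e)).2.Nodup := by
  induction files with
  | nil => intro d e hd he; exact ⟨hd, he⟩
  | cons rel rest ih =>
    intro d e hd he
    rw [List.foldl_cons]
    by_cases hL : (pvParts rel).length = 1
    · have hstep : pvStepOuter (d, e) rel = (d, PySem.Set.add e ("dir:.", "file:" ++ rel)) := by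
        rw [pvStepOuter, if_pos hL]
      rw [hstep]
      exact ih _ _ hd (PySem.Set.nodup_add _ _ he)
    · have hstep : pvStepOuter (d, e) rel =
          ((((PySem.List.slice (pvParts rel) none (some (-1)))).foldl pvStepInner (".", ([], d, e))).2.2.1,
           PySem.Set.add ((((PySem.List.slice (pvParts rel) none (some (-1)))).foldl pvStepInner (".", ([], d, e))).2.2.2)
             ("dir:" ++ ((((PySem.List.slice (pvParts rel) none (some (-1)))).foldl pvStepInner (".", ([], d, e))).1), "file:" ++ rel)) := by
        rw [pvStepOuter, if_neg hL]
      rw [hstep]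
      obtain ⟨hnd, hne⟩ := pv_innerA_nodup _ "." [] d e hd he
      exact ih _ _ hnd (PySem.Set.nodup_add _ _ hne)

def pvStepB1 (subdirs : PySem.Set String) (rel : String) : PySem.Set String :=
  (PySem.List.pyRange 1 ((pvParts rel).length : Int)).foldl
    (fun subdirs i => PySem.Set.add subdirs (PySem.Str.join "/" (PySem.List.slice (pvParts rel) none (some i))))
    subdirs

def pvSubB (files : List String) : PySem.Set String := files.foldl pvStepB1 PySem.Set.empty

def pvEdgeB2 (d : String) : String × String := ("dir:" ++ pvParentB d, "dir:" ++ d)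

def pvFileEdgeB (rel : String) : String × String :=
  ("dir:" ++ (if (pvParts rel).length = 1 then "."
              else PySem.Str.join "/" (PySem.List.slice (pvParts rel) none (some (-1)))),
   "file:" ++ rel)

def pvEdgesB (files : List String) : PySem.Set (String × String) :=
  files.foldl (fun e rel => PySem.Set.add e (pvFileEdgeB rel))
    ((PySem.List.sorted (pvSubB files) (fun x => x) false).foldl
      (fun e d => PySem.Set.add e (pvEdgeB2 d)) PySem.Set.empty)

lemma pv_nodup_foldl_add {α β : Type} [BEq α] [LawfulBEq α] (l : List β) (f : β → α) :
    ∀ (s : PySem.Set α), s.Nodup → (l.foldl (fun s b => PySem.Set.add s (f b)) s).Nodup := by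
  induction l with
  | nil => intro s hs; exact hs
  | cons b t ih => intro s hs; exact ih _ (PySem.Set.nodup_add _ _ hs)

lemma pv_stepB1_mem (rel : String) (s : PySem.Set String) (x : String) :
    x ∈ pvStepB1 s rel ↔ x ∈ s ∨ ∃ k : Nat, 1 ≤ k ∧ k < (pvParts rel).length ∧ x = pvJ ((pvParts rel).take k) := by
  rw [pvStepB1, PySem.Set.mem_foldl_add]
  constructor
  · rintro (hx | ⟨i, hi, rfl⟩)
    · exact Or.inl hx
    · rw [PySem.List.mem_pyRange_one] at hi
      refine Or.inr ⟨i.toNat, by omega, by omega, ?_⟩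
      rw [pvJ, PySem.List.slice_to _ (by omega)]
  · rintro (hx | ⟨k, hk1, hk2, rfl⟩)
    · exact Or.inl hx
    · refine Or.inr ⟨(k : Int), PySem.List.mem_pyRange_one.mpr (by omega), ?_⟩
      rw [pvJ, PySem.List.slice_to _ (by omega)]
      simp

lemma pv_memB_sub (files : List String) :
    ∀ (s : PySem.Set String) (x : String), x ∈ files.foldl pvStepB1 s ↔ x ∈ s ∨ pvDirSpec files x := by
  induction files with
  | nil => intro s x; simp [pvDirSpec]
  | cons rel rest ih =>
    intro s x
    rw [List.foldl_cons, ih, pv_stepB1_mem, pv_dirSpec_cons, or_assoc]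

lemma pv_nodupB_sub (files : List String) :
    ∀ (s : PySem.Set String), s.Nodup → (files.foldl pvStepB1 s).Nodup := by
  induction files with
  | nil => intro s hs; exact hs
  | cons rel rest ih =>
    intro s hs
    exact ih _ (pv_nodup_foldl_add _ _ _ hs)

lemma pvEdgeB2_take (rel : String) (k : Nat) (h1 : 1 ≤ k) (h2 : k < (pvParts rel).length) :
    pvEdgeB2 (pvJ ((pvParts rel).take k)) =
      ("dir:" ++ pvParent rel k, "dir:" ++ pvJ ((pvParts rel).take k)) := by
  have hlen : ((pvParts rel).take k).length = k := by
    rw [List.length_take]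
    omega
  have hne : (pvParts rel).take k ≠ [] := by
    intro h
    rw [← List.length_eq_zero_iff, hlen] at h
    omega
  have hns : ∀ p ∈ (pvParts rel).take k, ('/' : Char) ∉ p.toList :=
    fun p hp => pvParts_noslash rel p (List.mem_of_mem_take hp)
  rw [pvEdgeB2, pvParentB_pvJ hne hns, hlen]
  rw [pvParent]
  by_cases hk1 : k = 1
  · rw [if_pos hk1, if_pos hk1]
  · rw [if_neg hk1, if_neg hk1]
    have : ((pvParts rel).take k).dropLast = (pvParts rel).take (k - 1) := by
      rw [List.dropLast_eq_take, List.take_take, hlen]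
      congr 1
      omega
    rw [this]

lemma pvFileEdgeB_eq (rel : String) : pvFileEdgeB rel = ("dir:" ++ pvFileParent rel, "file:" ++ rel) := by
  rw [pvFileEdgeB, pvFileParent, pv_slice_neg_one]
  rfl

lemma pv_memB_edges (files : List String) :
    ∀ y, y ∈ pvEdgesB files ↔ pvEdgeSpec files y := by
  intro y
  rw [pvEdgesB, PySem.Set.mem_foldl_add, PySem.Set.mem_foldl_add]
  constructor
  · rintro ((h | ⟨d, hd, rfl⟩) | ⟨rel, hrel, rfl⟩)
    · exact absurd h (by simp [PySem.Set.empty])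
    · rw [PySem.List.mem_sorted] at hd
      unfold pvSubB at hd
      rw [pv_memB_sub] at hd
      rcases hd with h | ⟨rel, hrel, k, hk1, hk2, rfl⟩
      · exact absurd h (by simp [PySem.Set.empty])
      · rw [pvEdgeB2_take rel k hk1 hk2]
        exact Or.inl ⟨rel, hrel, k, hk1, hk2, rfl⟩
    · rw [pvFileEdgeB_eq]
      exact Or.inr ⟨rel, hrel, rfl⟩
  · rintro (⟨rel, hrel, k, hk1, hk2, rfl⟩ | ⟨rel, hrel, rfl⟩)
    · refine Or.inl (Or.inr ⟨pvJ ((pvParts rel).take k), ?_, ?_⟩)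
      · rw [PySem.List.mem_sorted]
        unfold pvSubB
        rw [pv_memB_sub]
        exact Or.inr ⟨rel, hrel, k, hk1, hk2, rfl⟩
      · rw [pvEdgeB2_take rel k hk1 hk2]
    · exact Or.inr ⟨rel, hrel, (pvFileEdgeB_eq rel).symm⟩

lemma pv_before_eq :
    (fun (a b : String × String) => decide (a.1 < b.1) || (!decide (b.1 < a.1) && decide (a.2 < b.2)))
      = fun (a b : String × String) => decide ((toLex a : Lex (String × String)) < toLex b) := by
  funext a b
  by_cases h1 : a.1 < b.1
  · simp [h1, Prod.Lex.toLex_lt_toLex]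
  · by_cases h2 : b.1 < a.1
    · have hne : ¬ a.1 = b.1 := fun he => absurd (he ▸ h2) h1
      simp [h1, h2, Prod.Lex.toLex_lt_toLex, hne]
    · have heq : a.1 = b.1 := le_antisymm (not_lt.mp h2) (not_lt.mp h1)
      simp [h1, h2, Prod.Lex.toLex_lt_toLex, heq]

lemma pv_sorted2_eq_sorted_lex (xs : List (String × String)) :
    PySem.List.sorted2 xs (fun e => e.1) (fun e => e.2) false
      = PySem.List.sorted xs (fun e => (toLex e : Lex (String × String))) false := by
  rw [PySem.List.sorted_eq_foldl_insertBy]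
  show List.foldl (fun acc x => PySem.List.insertBy
      (fun (a b : String × String) => decide (a.1 < b.1) || (!decide (b.1 < a.1) && decide (a.2 < b.2)))
      x acc) [] xs = _
  rw [pv_before_eq]

def pvStA (files : List String) : PySem.Set String × PySem.Set (String × String) :=
  files.foldl pvStepOuter (PySem.Set.ofList ["."], PySem.Set.empty)

lemma pv_dirs_nodupA (files : List String) : ((pvStA files).1).Nodup :=
  (pv_outerA_nodup files (PySem.Set.ofList ["."]) PySem.Set.empty (by simp) (by simp [PySem.Set.empty])).1

lemma pv_edges_nodupA (files : List String) : ((pvStA files).2).Nodup :=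
  (pv_outerA_nodup files (PySem.Set.ofList ["."]) PySem.Set.empty (by simp) (by simp [PySem.Set.empty])).2

lemma pv_dirs_perm (files : List String) :
    ((pvStA files).1).Perm (PySem.Set.union (pvSubB files) ["."]) := by
  rw [List.perm_ext_iff_of_nodup (pv_dirs_nodupA files)
    (PySem.Set.nodup_union (pvSubB files) ["."]
      (show (pvSubB files).Nodup from pv_nodupB_sub files PySem.Set.empty (by simp [PySem.Set.empty])))]
  intro x
  rw [PySem.Set.mem_union]
  have hA := (pv_outerA_spec files (PySem.Set.ofList ["."]) PySem.Set.empty).1 x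
  unfold pvStA
  rw [hA]
  unfold pvSubB
  rw [pv_memB_sub]
  simp [PySem.Set.empty, PySem.Set.mem_ofList]
  tauto

lemma pv_edges_perm (files : List String) : ((pvStA files).2).Perm (pvEdgesB files) := by
  have hnB : (pvEdgesB files).Nodup := by
    unfold pvEdgesB
    exact pv_nodup_foldl_add _ _ _ (pv_nodup_foldl_add _ _ _ (by simp [PySem.Set.empty]))
  rw [List.perm_ext_iff_of_nodup (pv_edges_nodupA files) hnB]
  intro y
  have hA := (pv_outerA_spec files (PySem.Set.ofList ["."]) PySem.Set.empty).2 y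
  unfold pvStA
  rw [hA, pv_memB_edges]
  simp [PySem.Set.empty]

lemma pv_buildA_eq (files : List String) : build_directory_index files =
    (PySem.List.sorted (pvStA files).1 (fun x => x) false,
     (PySem.List.sorted2 (pvStA files).2 (fun e => e.1) (fun e => e.2) false).map
       (fun e => [("from", e.1), ("to", e.2), ("type", "contains")])) := rfl

lemma pv_buildB_eq (files : List String) : build_directory_index_alt files =
    (PySem.List.sorted (PySem.Set.union (pvSubB files) ["."]) (fun x => x) false,
     (PySem.List.sorted2 (pvEdgesB files) (fun e => e.1) (fun e => e.2) false).map
       (fun e => [("from", e.1), ("to", e.2), ("type", "contains")])) := rfl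

-- ===== VERDICT (by name: the statement is the Claim_ definition above) =====
theorem build_directory_index_spec : Claim_equal_build_directory_index := by
  intro files _
  show build_directory_index files = build_directory_index_alt files
  rw [pv_buildA_eq, pv_buildB_eq]
  have hd : PySem.List.sorted (pvStA files).1 (fun x => x) false
      = PySem.List.sorted (PySem.Set.union (pvSubB files) ["."]) (fun x => x) false :=
    PySem.List.sorted_eq_sorted_of_perm _ _ _ (fun a b h => h) (pv_dirs_perm files)
  have he : PySem.List.sorted2 (pvStA files).2 (fun e => e.1) (fun e => e.2) false
      = PySem.List.sorted2 (pvEdgesB files) (fun e => e.1) (fun e => e.2) false := by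
    rw [pv_sorted2_eq_sorted_lex, pv_sorted2_eq_sorted_lex]
    exact PySem.List.sorted_eq_sorted_of_perm _ _ _
      (fun a b h => by simpa using congrArg ofLex h) (pv_edges_perm files)
  rw [hd, he]
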